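-- pv_equiv track=rewrite | github.com/kiran-sec/PackageSentinel | src/signal_collector.py | _check_character_swapping
-- ===== SOURCE A (Python) =====
-- def _check_character_swapping(name1: str, name2: str) -> bool:
--     """Check for adjacent character swaps (transposition)."""
--     if len(name1) != len(name2):
--         return False
--
--     differences = sum(1 for a, b in zip(name1, name2) if a != b)
--
--     # If exactly 2 differences, check if they're adjacent swapped characters
--     if differences == 2:
--         diff_positions = [i for i, (a, b) in enumerate(zip(name1, name2)) if a != b]
--         if len(diff_positions) == 2 and abs(diff_positions[0] - diff_positions[1]) == 1:
--             # Check if swapping fixes both positions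
--             i, j = diff_positions
--             return name1[i] == name2[j] and name1[j] == name2[i]
--
--     return False
-- ===== SOURCE B (Python) =====
-- def _check_character_swapping(name1: str, name2: str) -> bool:
--     """Check for adjacent character swaps (transposition).
--
--     Single forward scan: find the first index where the strings differ,
--     then the strings are an adjacent transposition iff that index and the
--     next are a swapped pair and the remaining suffix is identical.
--     """
--     if len(name1) != len(name2):
--         return False
--     n = len(name1)
--     i = 0
--     while i < n and name1[i] == name2[i]:
--         i += 1
--     if i >= n - 1:
--         return False
--     return (name1[i] == name2[i + 1] and name1[i + 1] == name2[i]
--             and name1[i + 2:] == name2[i + 2:])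
-- ===== Notes on version B (the rewrite author's own statement) =====
-- stated objective: simpler
-- what changed: Replaced A's two full passes (count all differences, then collect all difference positions and test adjacency) with a single scan that stops at the first mismatch and directly validates the swapped pair and the unchanged suffix.
import Mathlib
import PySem

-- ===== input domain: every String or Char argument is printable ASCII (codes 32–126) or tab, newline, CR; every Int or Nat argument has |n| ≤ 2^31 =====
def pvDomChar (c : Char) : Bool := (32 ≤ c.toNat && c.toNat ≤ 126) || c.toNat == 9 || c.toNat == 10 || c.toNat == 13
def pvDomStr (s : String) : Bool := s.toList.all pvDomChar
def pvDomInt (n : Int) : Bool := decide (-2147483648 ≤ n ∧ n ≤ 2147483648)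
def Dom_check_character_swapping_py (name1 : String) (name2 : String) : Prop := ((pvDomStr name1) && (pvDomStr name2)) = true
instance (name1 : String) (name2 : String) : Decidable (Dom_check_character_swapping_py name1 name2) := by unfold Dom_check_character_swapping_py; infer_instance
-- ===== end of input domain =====

-- B replaces A's two-pass "count differences, collect positions, test adjacency" strategy
-- with a single scan that stops at the first mismatch and validates the swapped pair and the
-- suffix (objective: simpler; same return value on all inputs).


-- ===== PORT A =====
-- literal transliteration of A: length guard, count of mismatched zipped pairs, then the
-- list of mismatch positions via enumerate, the adjacency test, and the swap check.
def check_character_swapping_py (name1 : String) (name2 : String) : Bool :=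
  let l1 := name1.toList
  let l2 := name2.toList
  if l1.length ≠ l2.length then false
  else
    -- differences = sum(1 for a, b in zip(name1, name2) if a != b)
    let differences : Int := ((l1.zip l2).map (fun p => if p.1 ≠ p.2 then (1 : Int) else 0)).sum
    if differences = 2 then
      -- diff_positions = [i for i, (a, b) in enumerate(zip(name1, name2)) if a != b]
      let diff_positions : List Int :=
        ((PySem.List.enumerate (l1.zip l2)).filter (fun p => p.2.1 ≠ p.2.2)).map (·.1)
      -- if len(diff_positions) == 2 and abs(dp[0] - dp[1]) == 1: i, j = diff_positions; …
      match diff_positions with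
      | [i, j] =>
        if (i - j).natAbs = 1 then
          -- name1[i] == name2[j] and name1[j] == name2[i]; the none branches are
          -- unreachable (enumerate positions are always in range, Python never raises here)
          match PySem.List.pyGet? l1 i, PySem.List.pyGet? l2 j,
                PySem.List.pyGet? l1 j, PySem.List.pyGet? l2 i with
          | some w, some x, some y, some z => w == x && y == z
          | _, _, _, _ => false
        else false
      | _ => false
    else false

-- ===== PORT B =====
-- Source B's while loop "advance past the equal prefix" as the obvious structural recursion over
-- the two lists; at the first mismatch check the swapped pair and compare the suffixes.
def pvAltCore : List Char → List Char → Bool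
  | a :: t1, b :: t2 =>
    if a = b then pvAltCore t1 t2
    else
      match t1, t2 with
      | c :: r1, d :: r2 => a == d && c == b && r1 == r2   -- swap check + unchanged suffix
      | [], _ => false                                     -- i >= n - 1
      | _ :: _, [] => false
  | [], _ => false                                         -- no mismatch found
  | _ :: _, [] => false

def check_character_swapping_py_alt (name1 : String) (name2 : String) : Bool :=
  let l1 := name1.toList
  let l2 := name2.toList
  if l1.length = l2.length then pvAltCore l1 l2 else false

-- ===== PRECONDITION & SPEC =====
def Spec_check_character_swapping_py (name1 : String) (name2 : String) (out : Bool) : Prop := out = check_character_swapping_py_alt name1 name2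
instance (name1 : String) (name2 : String) (out : Bool) : Decidable (Spec_check_character_swapping_py name1 name2 out) := by unfold Spec_check_character_swapping_py; infer_instance

-- ===== CLAIM (what is proved, stated in full; the proofs are below) =====
def Claim_equal_check_character_swapping_py : Prop := ∀ (name1 : String) (name2 : String), Dom_check_character_swapping_py name1 name2 → Spec_check_character_swapping_py name1 name2 (check_character_swapping_py name1 name2)

-- ===== LEMMAS AND PROOFS =====

def dposN : List (Char × Char) → List Nat
  | [] => []
  | p :: rest => if p.1 ≠ p.2 then 0 :: (dposN rest).map (· + 1) else (dposN rest).map (· + 1)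

theorem map_shift (L : List Nat) (s : Int) :
    (L.map (· + 1)).map (fun k : Nat => s + (k : Int)) = L.map (fun k : Nat => s + 1 + (k : Int)) := by
  induction L with
  | nil => simp
  | cons a t ih =>
    simp only [List.map_cons, ih, List.cons.injEq, and_true]
    push_cast
    ring

theorem dpos_int (l : List (Char × Char)) (s : Int) :
    ((PySem.List.enumerate l s).filter (fun p => p.2.1 ≠ p.2.2)).map (·.1)
      = (dposN l).map (fun k : Nat => s + (k : Int)) := by
  induction l generalizing s with
  | nil => simp [dposN, PySem.List.enumerate_nil]
  | cons p rest ih =>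
    rw [PySem.List.enumerate_cons, List.filter_cons]
    by_cases h : p.1 = p.2
    · rw [if_neg (by simp [h]), ih (s + 1), dposN]
      rw [if_neg (by simp [h]), map_shift]
    · rw [if_pos (by simpa using h), dposN, if_pos (by simpa using h)]
      rw [List.map_cons, ih (s + 1), List.map_cons, map_shift]
      simp

theorem cnt_eq (l : List (Char × Char)) :
    ((l.map (fun p => if p.1 ≠ p.2 then (1 : Int) else 0)).sum) = ((dposN l).length : Int) := by
  induction l with
  | nil => simp [dposN]
  | cons p rest ih =>
    by_cases h : p.1 = p.2
    · rw [List.map_cons, List.sum_cons, if_neg (by simp [h]), dposN, if_neg (by simp [h]),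
        zero_add, ih, List.length_map]
    · rw [List.map_cons, List.sum_cons, if_pos (by simpa using h), dposN, if_pos (by simpa using h),
        ih, List.length_cons, List.length_map]
      push_cast
      ring

theorem mem_dposN_lt (l : List (Char × Char)) (k : Nat) (h : k ∈ dposN l) : k < l.length := by
  induction l generalizing k with
  | nil => simp [dposN] at h
  | cons p rest ih =>
    simp only [dposN] at h
    by_cases hp : p.1 = p.2
    · rw [if_neg (by simp [hp])] at h
      obtain ⟨m, hm, rfl⟩ := List.mem_map.mp h
      have := ih m hm; simp; omega
    · rw [if_pos (by simpa using hp)] at h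
      rcases List.mem_cons.mp h with h | h
      · simp [h]
      · obtain ⟨m, hm, rfl⟩ := List.mem_map.mp h
        have := ih m hm; simp; omega

theorem dposN_nil_iff (l1 l2 : List Char) (h : l1.length = l2.length) :
    dposN (l1.zip l2) = [] ↔ l1 = l2 := by
  induction l1 generalizing l2 with
  | nil => cases l2 <;> simp_all [dposN]
  | cons a t1 ih =>
    cases l2 with
    | nil => simp at h
    | cons b t2 =>
      rw [List.zip_cons_cons, dposN]
      by_cases hab : a = b
      · rw [if_neg (by simp [hab])]
        simp [hab, ih t2 (by simpa using h)]
      · rw [if_pos (by simpa using hab)]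
        simp [hab]

def AcoreN (l1 l2 : List Char) : Bool :=
  match dposN (l1.zip l2) with
  | [i, j] => decide (j = i + 1) && (l1[i]? == l2[j]?) && (l1[j]? == l2[i]?)
  | _ => false

theorem dposN_pairwise (l : List (Char × Char)) : (dposN l).Pairwise (· < ·) := by
  induction l with
  | nil => simp [dposN]
  | cons p rest ih =>
    rw [dposN]
    by_cases hp : p.1 = p.2
    · rw [if_neg (by simp [hp])]
      exact List.pairwise_map.mpr (ih.imp (by omega))
    · rw [if_pos (by simpa using hp)]
      refine List.pairwise_cons.mpr ⟨?_, List.pairwise_map.mpr (ih.imp (by omega))⟩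
      intro k hk
      obtain ⟨m, _, rfl⟩ := List.mem_map.mp hk
      omega

theorem map_cast_zero (L : List Nat) :
    L.map (fun k : Nat => (0 : Int) + (k : Int)) = L.map (fun k : Nat => (k : Int)) := by
  apply List.map_congr_left
  intro k _
  omega

theorem portA_eq_AcoreN (name1 name2 : String) (h : name1.toList.length = name2.toList.length) :
    check_character_swapping_py name1 name2 = AcoreN name1.toList name2.toList := by
  simp only [check_character_swapping_py]
  rw [if_neg (by simpa using h), cnt_eq, dpos_int _ 0, map_cast_zero]
  have hpw := dposN_pairwise (name1.toList.zip name2.toList)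
  have hlt := mem_dposN_lt (name1.toList.zip name2.toList)
  have hz : (name1.toList.zip name2.toList).length = name1.toList.length := by
    rw [List.length_zip, h, Nat.min_self]
  rcases hL : dposN (name1.toList.zip name2.toList) with _ | ⟨i, _ | ⟨j, _ | ⟨k, r⟩⟩⟩
  · simp [AcoreN, hL]
  · simp [AcoreN, hL]
  · -- two positions i < j, both in range
    rw [hL] at hpw hlt
    have hij : i < j := by
      have := List.pairwise_cons.mp hpw
      exact this.1 j (by simp)
    have hi : i < name1.toList.length := hz ▸ hlt i (by simp)
    have hj : j < name1.toList.length := hz ▸ hlt j (by simp)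
    have hi2 : i < name2.toList.length := h ▸ hi
    have hj2 : j < name2.toList.length := h ▸ hj
    rw [if_pos (by simp)]
    simp only [List.map_cons, List.map_nil, AcoreN, hL]
    by_cases hadj : j = i + 1
    · rw [if_pos (by omega)]
      rw [PySem.List.pyGet?_natCast, PySem.List.pyGet?_natCast,
          PySem.List.pyGet?_natCast, PySem.List.pyGet?_natCast]
      rw [List.getElem?_eq_getElem hi, List.getElem?_eq_getElem hj2,
          List.getElem?_eq_getElem hj, List.getElem?_eq_getElem hi2]
      simp [hadj]
    · rw [if_neg (by omega)]
      simp [hadj]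
  · -- three or more positions: count ≠ 2
    simp [AcoreN, hL]

theorem pvAltCore_cons (a b : Char) (t1 t2 : List Char) :
    pvAltCore (a :: t1) (b :: t2) =
      if a = b then pvAltCore t1 t2
      else
        match t1, t2 with
        | c :: r1, d :: r2 => a == d && c == b && r1 == r2
        | [], _ => false
        | _ :: _, [] => false := rfl

theorem AcoreN_eq_altCore (l1 : List Char) : ∀ l2 : List Char, l1.length = l2.length →
    AcoreN l1 l2 = pvAltCore l1 l2 := by
  induction l1 with
  | nil =>
    intro l2 h
    cases l2 with
    | nil => rfl
    | cons b t2 => simp at h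
  | cons a t1 ih =>
    intro l2 h
    cases l2 with
    | nil => simp at h
    | cons b t2 =>
      have ht : t1.length = t2.length := by
        simp only [List.length_cons] at h; omega
      by_cases hab : a = b
      · -- equal heads: A's positions shift by one, B recurses
        have hd : dposN ((a, b) :: t1.zip t2) = (dposN (t1.zip t2)).map (· + 1) := by
          rw [dposN, if_neg (by simp [hab])]
        rw [pvAltCore_cons, if_pos hab, ← ih t2 ht]
        rcases hX : dposN (t1.zip t2) with _ | ⟨i, _ | ⟨j, _ | ⟨k, r⟩⟩⟩ <;>
          simp [AcoreN, hd, hX]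
      · -- first mismatch at position 0
        rw [pvAltCore_cons, if_neg hab]
        have hd0 : dposN ((a, b) :: t1.zip t2) = 0 :: (dposN (t1.zip t2)).map (· + 1) := by
          rw [dposN, if_pos (by simpa using hab)]
        cases t1 with
        | nil =>
          cases t2 with
          | nil => simp [AcoreN, dposN, hab]
          | cons d r2 => simp only [List.length_nil, List.length_cons] at ht; omega
        | cons c r1 =>
          cases t2 with
          | nil => simp only [List.length_nil, List.length_cons] at ht; omega
          | cons d r2 =>
            have hr : r1.length = r2.length := by
              simp only [List.length_cons] at ht; omega
            rw [List.zip_cons_cons] at hd0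
            by_cases hcd : c = d
            · -- second pair equal: A can never see adjacent positions 0,1
              have hd1 : dposN ((c, d) :: r1.zip r2) = (dposN (r1.zip r2)).map (· + 1) := by
                rw [dposN, if_neg (by simp [hcd])]
              have hB : (a == d && c == b && r1 == r2) = false := by
                by_cases h1 : a = d
                · by_cases h2 : c = b
                  · exact absurd (by rw [h1, ← hcd, h2]) hab
                  · simp [h2]
                · simp [h1]
              rcases hY : dposN (r1.zip r2) with _ | ⟨i, _ | ⟨j, Y⟩⟩ <;>
                simp [AcoreN, hd0, hd1, hY, hB]
            · -- mismatch at 0 and 1: swap check, suffix must be clean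
              have hd1 : dposN ((c, d) :: r1.zip r2) = 0 :: (dposN (r1.zip r2)).map (· + 1) := by
                rw [dposN, if_pos (by simpa using hcd)]
              rcases hZ : dposN (r1.zip r2) with _ | ⟨i, Z⟩
              · have hsuff : r1 = r2 := (dposN_nil_iff r1 r2 hr).mp hZ
                subst hsuff
                simp [AcoreN, hd0, hd1, hZ]
              · have hsuff : r1 ≠ r2 := by
                  intro he
                  rw [(dposN_nil_iff r1 r2 hr).mpr he] at hZ
                  simp at hZ
                simp [AcoreN, hd0, hd1, hZ, hsuff]

-- ===== VERDICT (by name: the statement is the Claim_ definition above) =====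
theorem check_character_swapping_py_spec : Claim_equal_check_character_swapping_py := by
  intro name1 name2 _
  unfold Spec_check_character_swapping_py check_character_swapping_py_alt
  by_cases h : name1.toList.length = name2.toList.length
  · rw [if_pos h, portA_eq_AcoreN name1 name2 h, AcoreN_eq_altCore _ _ h]
  · rw [if_neg h]
    simp only [check_character_swapping_py]
    rw [if_pos (by simpa using h)]
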